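-- pv_equiv track=rewrite | github.com/tblacerda/skynet | skynet/huawei.py | is_1800_15MHz
-- ===== SOURCE A (Python) =====
-- def is_1800_15MHz(cell_name):
--     """Check if the cell name ends with any of the specified strings."""
--     special_endings = ["18-1A",
--                        "18-1B",
--                        "18-1C",
--                        "18-2A",
--                        "18-2B",
--                        "18-2C",
--                        "18-3A",
--                        "18-3B",
--                        "18-3C",
--                        "18-4A",
--                        "18-4B",
--                        "18-4C"]
--     return any(cell_name.endswith(ending) for ending in special_endings)
-- ===== SOURCE B (Python) =====
-- def is_1800_15MHz(cell_name):
--     """Check if the cell name ends with any of the specified strings."""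
--     t = cell_name[-5:]
--     return len(t) == 5 and t[:3] == "18-" and t[3] in "1234" and t[4] in "ABC"
-- ===== Notes on version B (the rewrite author's own statement) =====
-- stated objective: idiomatic
-- what changed: Replaces the any()-loop over a 12-string endswith list by a single positional check of the last five characters (prefix '18-', fourth char in '1234', fifth in 'ABC').
import Mathlib
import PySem

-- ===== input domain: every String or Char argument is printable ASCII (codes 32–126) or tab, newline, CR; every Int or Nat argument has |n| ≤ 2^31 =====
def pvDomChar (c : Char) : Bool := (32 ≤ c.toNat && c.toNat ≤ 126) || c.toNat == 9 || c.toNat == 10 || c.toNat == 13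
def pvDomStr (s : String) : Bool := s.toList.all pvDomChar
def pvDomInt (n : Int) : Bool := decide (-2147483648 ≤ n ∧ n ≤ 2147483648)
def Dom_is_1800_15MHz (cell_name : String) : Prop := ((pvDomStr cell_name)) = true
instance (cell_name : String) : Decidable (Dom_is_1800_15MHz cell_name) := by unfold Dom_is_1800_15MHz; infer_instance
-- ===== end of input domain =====

-- B replaces the 12-way endswith enumeration by one positional check of the last five characters (simpler/idiomatic).

-- ===== PORT A =====
def is_1800_15MHz (cell_name : String) : Bool :=
  let special_endings : List String :=
    ["18-1A", "18-1B", "18-1C", "18-2A", "18-2B", "18-2C",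
     "18-3A", "18-3B", "18-3C", "18-4A", "18-4B", "18-4C"]
  special_endings.any (fun ending => PySem.Str.endswith cell_name ending)

-- ===== PORT B =====
-- t[3] / t[4] are ported with pyGetD; the default is never read because the
-- length-5 test guards them (Python short-circuits `and` the same way).
def is_1800_15MHz_alt (cell_name : String) : Bool :=
  let t : List Char := PySem.List.slice cell_name.toList (some (-5)) none
  t.length == 5 && (PySem.List.slice t none (some 3) == ['1', '8', '-'])
    && (['1', '2', '3', '4'] : List Char).contains (PySem.List.pyGetD t 3 ' ')
    && (['A', 'B', 'C'] : List Char).contains (PySem.List.pyGetD t 4 ' ')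

-- ===== PRECONDITION & SPEC =====
def Spec_is_1800_15MHz (cell_name : String) (out : Bool) : Prop := out = is_1800_15MHz_alt cell_name
instance (cell_name : String) (out : Bool) : Decidable (Spec_is_1800_15MHz cell_name out) := by unfold Spec_is_1800_15MHz; infer_instance

-- ===== CLAIM (what is proved, stated in full; the proofs are below) =====
def Claim_equal_is_1800_15MHz : Prop := ∀ (cell_name : String), Dom_is_1800_15MHz cell_name → Spec_is_1800_15MHz cell_name (is_1800_15MHz cell_name)

-- ===== LEMMAS AND PROOFS =====

lemma key (s : String) : is_1800_15MHz s = is_1800_15MHz_alt s := by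
  simp only [is_1800_15MHz, is_1800_15MHz_alt, List.any_cons, List.any_nil,
    PySem.Str.endswith_eq]
  generalize s.toList = l
  obtain ⟨r, rfl⟩ : ∃ r : List Char, l = r.reverse := ⟨l.reverse, by simp⟩
  match r with
  | [] => decide
  | [a] => simp [PySem.Chars.endswith, List.isSuffixOf, List.isPrefixOf, PySem.List.slice]
  | [a, b] => simp [PySem.Chars.endswith, List.isSuffixOf, List.isPrefixOf, PySem.List.slice]
  | [a, b, c] => simp [PySem.Chars.endswith, List.isSuffixOf, List.isPrefixOf, PySem.List.slice]
  | [a, b, c, d] => simp [PySem.Chars.endswith, List.isSuffixOf, List.isPrefixOf, PySem.List.slice]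
  | e :: d :: c :: b :: a :: rest =>
      have hL : (e :: d :: c :: b :: a :: rest).reverse = rest.reverse ++ [a, b, c, d, e] := by simp
      rw [hL]
      have hdrop : List.drop rest.length (rest.reverse ++ [a, b, c, d, e]) = [a, b, c, d, e] :=
        List.drop_left' (by simp)
      have hsuf : ∀ p : List Char, p.length = 5 →
          (PySem.Chars.endswith (rest.reverse ++ [a, b, c, d, e]) p = true ↔ p = [a, b, c, d, e]) := by
        intro p hp
        rw [PySem.Chars.endswith_iff, List.suffix_iff_eq_drop, hp]
        simp [hdrop]
      have hslice : PySem.List.slice (rest.reverse ++ [a, b, c, d, e]) (some (-5)) none = [a, b, c, d, e] := by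
        rw [show (-5 : Int) = -((5 : ℕ) : Int) by norm_num,
          PySem.List.slice_from_neg_natCast _ _ (by norm_num)]
        simp [hdrop]
      rw [Bool.eq_iff_iff]
      simp only [Bool.or_eq_true, Bool.and_eq_true, hslice]
      rw [hsuf _ rfl, hsuf _ rfl, hsuf _ rfl, hsuf _ rfl, hsuf _ rfl, hsuf _ rfl,
        hsuf _ rfl, hsuf _ rfl, hsuf _ rfl, hsuf _ rfl, hsuf _ rfl, hsuf _ rfl]
      simp [PySem.List.slice, PySem.List.pyGetD, PySem.List.pyGet?, PySem.List.pyIdx?, List.getElem?_cons]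
      constructor
      · rintro (⟨rfl, rfl, rfl, rfl, rfl⟩|⟨rfl, rfl, rfl, rfl, rfl⟩|⟨rfl, rfl, rfl, rfl, rfl⟩|⟨rfl, rfl, rfl, rfl, rfl⟩|⟨rfl, rfl, rfl, rfl, rfl⟩|⟨rfl, rfl, rfl, rfl, rfl⟩|⟨rfl, rfl, rfl, rfl, rfl⟩|⟨rfl, rfl, rfl, rfl, rfl⟩|⟨rfl, rfl, rfl, rfl, rfl⟩|⟨rfl, rfl, rfl, rfl, rfl⟩|⟨rfl, rfl, rfl, rfl, rfl⟩|⟨rfl, rfl, rfl, rfl, rfl⟩) <;> simp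
      · rintro ⟨⟨⟨rfl, rfl, rfl⟩, (rfl|rfl|rfl|rfl)⟩, (rfl|rfl|rfl)⟩ <;> simp

-- ===== VERDICT (by name: the statement is the Claim_ definition above) =====
theorem is_1800_15MHz_spec : Claim_equal_is_1800_15MHz := by
  intro s _
  show is_1800_15MHz s = is_1800_15MHz_alt s
  exact key s
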